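-- pv_equiv track=rewrite | github.com/x-meowzilla/CSCA08-A48 | CSCA48/11_Heap/is_heap.py | max_heap
-- ===== SOURCE A (Python) =====
-- def max_heap(L):
--     '''(list) -> bool
--
--     Return True if the list satisfies max heap property
--
--     '''
--     if (len(L) <= 1):
--         return True
--     else:
--         i_last = len(L)-1
--         i_last_parent = (i_last-1)//2
--         #children are always less than parents
--         if L[i_last] < L[i_last_parent]:
--             return max_heap(L[:i_last])
--     return False
--
-- L = [2, 5, 8, 3, 4, 9]
-- ===== SOURCE B (Python) =====
-- def max_heap(L):
--     return all(L[i] < L[(i - 1) // 2] for i in range(1, len(L)))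
-- ===== Notes on version B (the rewrite author's own statement) =====
-- stated objective: faster
-- what changed: Replaced the recursion that re-checks the last element and recurses on a copied slice L[:-1] (quadratic in time and memory) with a single linear scan comparing each element to its parent.
import Mathlib
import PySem

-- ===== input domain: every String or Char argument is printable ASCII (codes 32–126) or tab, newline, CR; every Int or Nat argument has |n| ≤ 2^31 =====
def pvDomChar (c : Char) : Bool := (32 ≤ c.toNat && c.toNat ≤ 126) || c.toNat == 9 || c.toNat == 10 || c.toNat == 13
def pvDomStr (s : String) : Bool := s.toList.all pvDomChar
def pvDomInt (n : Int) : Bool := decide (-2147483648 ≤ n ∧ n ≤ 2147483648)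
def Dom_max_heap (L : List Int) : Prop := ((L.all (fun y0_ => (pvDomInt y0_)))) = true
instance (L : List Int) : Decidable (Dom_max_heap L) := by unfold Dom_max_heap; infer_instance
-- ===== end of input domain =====

-- B replaces A's quadratic slice-and-recurse with a single linear parent-comparison scan (objective: faster).


-- ===== PORT A =====
-- termination helper for the port's recursion (cited in decreasing_by)
lemma pv_slice_len (L : List Int) (h : 2 ≤ L.length) :
    (PySem.List.slice L (some 0) (some ((L.length : Int) - 1))).length < L.length := by
  have hb : (0:Int) ≤ (L.length : Int) - 1 := by omega
  rw [PySem.List.slice_zero_start]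
  rw [PySem.List.slice_to (xs := L) (b := (L.length : Int) - 1) hb]
  simp only [List.length_take]
  omega

-- the two indices are always in range when L.length ≥ 2, so the pyGetD defaults are never used
def max_heap (L : List Int) : Bool :=
  if L.length ≤ 1 then true
  else
    let i_last : Int := (L.length : Int) - 1
    let i_last_parent : Int := PySem.Int.floordiv (i_last - 1) 2
    if PySem.List.pyGetD L i_last 0 < PySem.List.pyGetD L i_last_parent 0 then
      max_heap (PySem.List.slice L (some 0) (some i_last))
    else false
termination_by L.length
decreasing_by
  exact pv_slice_len L (by omega)

-- ===== PORT B =====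
def max_heap_alt (L : List Int) : Bool :=
  (PySem.List.pyRange 1 (L.length : Int) 1).all
    (fun i =>
      decide (PySem.List.pyGetD L i 0 <
              PySem.List.pyGetD L (PySem.Int.floordiv (i - 1) 2) 0))

-- ===== PRECONDITION & SPEC =====
def Spec_max_heap (L : List Int) (out : Bool) : Prop := out = max_heap_alt L
instance (L : List Int) (out : Bool) : Decidable (Spec_max_heap L out) := by unfold Spec_max_heap; infer_instance

-- ===== CLAIM (what is proved, stated in full; the proofs are below) =====
def Claim_equal_max_heap : Prop := ∀ (L : List Int), Dom_max_heap L → Spec_max_heap L (max_heap L)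

-- ===== LEMMAS AND PROOFS =====

-- common characterisation: every non-root position is strictly below its parent
def pvP (L : List Int) : Prop :=
  ∀ i : Nat, i < L.length → 1 ≤ i → L.getD i 0 < L.getD ((i - 1) / 2) 0

lemma pvGetD_take (L : List Int) (m i : Nat) (h : i < m) :
    (L.take m).getD i 0 = L.getD i 0 := by
  simp [List.getD, h]

lemma pv_alt_iff (L : List Int) : max_heap_alt L = true ↔ pvP L := by
  unfold max_heap_alt pvP
  rw [List.all_eq_true]
  constructor
  · intro h i hi h1
    have hm : (i : Int) ∈ PySem.List.pyRange 1 (L.length : Int) 1 := by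
      rw [PySem.List.mem_pyRange_one]; omega
    have hp := h _ hm
    have hc : (i : Int) - 1 = ((i - 1 : Nat) : Int) := by omega
    have hfd : PySem.Int.floordiv ((i - 1 : Nat) : Int) 2 = (((i - 1) / 2 : Nat) : Int) := by
      exact_mod_cast PySem.Int.floordiv_natCast (i - 1) 2
    rw [hc, hfd] at hp
    simp only [PySem.List.pyGetD_natCast, decide_eq_true_eq] at hp
    simpa [List.getD] using hp
  · intro h x hx
    rw [PySem.List.mem_pyRange_one] at hx
    have h1 : 1 ≤ x.toNat := by omega
    have h2 : x.toNat < L.length := by omega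
    have hx' : x = (x.toNat : Int) := by omega
    rw [hx']
    have hp := h x.toNat h2 h1
    have hc : ((x.toNat : Int)) - 1 = ((x.toNat - 1 : Nat) : Int) := by omega
    have hfd : PySem.Int.floordiv ((x.toNat - 1 : Nat) : Int) 2 = (((x.toNat - 1) / 2 : Nat) : Int) := by
      exact_mod_cast PySem.Int.floordiv_natCast (x.toNat - 1) 2
    rw [hc, hfd]
    simp only [PySem.List.pyGetD_natCast, decide_eq_true_eq]
    simpa [List.getD] using hp

lemma pvP_succ (L : List Int) (n : Nat) (hn : L.length = n + 1) (h1 : 1 ≤ n) :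
    pvP L ↔ (pvP (L.take n) ∧ L.getD n 0 < L.getD ((n - 1) / 2) 0) := by
  unfold pvP
  constructor
  · intro h
    refine ⟨fun i hi hi1 => ?_, h n (by omega) h1⟩
    have hilen : i < n := by simpa [List.length_take, hn] using hi
    rw [pvGetD_take L n i hilen, pvGetD_take L n _ (by omega)]
    exact h i (by omega) hi1
  · rintro ⟨hpre, hlast⟩ i hi hi1
    rcases Nat.lt_or_ge i n with hlt | hge
    · have := hpre i (by simp [List.length_take, hn]; omega) hi1
      rwa [pvGetD_take L n i hlt, pvGetD_take L n _ (by omega)] at this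
    · have : i = n := by omega
      subst this; exact hlast

lemma pv_A_iff : ∀ (n : Nat) (L : List Int), L.length = n → (max_heap L = true ↔ pvP L) := by
  intro n
  induction n with
  | zero =>
    intro L hL
    rw [max_heap.eq_def]
    simp [hL, pvP]
  | succ n ih =>
    intro L hL
    rcases Nat.eq_zero_or_pos n with h0 | h1
    · subst h0
      rw [max_heap.eq_def]
      simp only [hL]
      constructor
      · intro _ i hi hi1; omega
      · intro _; simp
    · rw [max_heap.eq_def]
      simp only [hL]
      have hgt : ¬ (n + 1 ≤ 1) := by omega
      rw [if_neg hgt]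
      have hc1 : ((n + 1 : Nat) : Int) - 1 = ((n : Nat) : Int) := by push_cast; ring
      have hc2 : ((n : Nat) : Int) - 1 = ((n - 1 : Nat) : Int) := by omega
      have hfd : PySem.Int.floordiv ((n - 1 : Nat) : Int) 2 = (((n - 1) / 2 : Nat) : Int) := by
        exact_mod_cast PySem.Int.floordiv_natCast (n - 1) 2
      rw [hc1, hc2, hfd]
      simp only [PySem.List.slice_zero_start]
      rw [PySem.List.slice_to (xs := L) (b := ((n : Nat) : Int)) (by omega)]
      have htk : ((n : Int)).toNat = n := by omega
      rw [htk]
      have hrec := ih (L.take n) (by simp [hL])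
      rw [pvP_succ L n hL h1]
      constructor
      · intro h
        by_cases hcond : PySem.List.pyGetD L ((n : Nat) : Int) 0 <
            PySem.List.pyGetD L (((n - 1) / 2 : Nat) : Int) 0
        · rw [if_pos hcond] at h
          refine ⟨hrec.mp h, ?_⟩
          simp only [PySem.List.pyGetD_natCast] at hcond
          simpa [List.getD] using hcond
        · rw [if_neg hcond] at h; exact absurd h (by simp)
      · rintro ⟨hpre, hlast⟩
        rw [if_pos (by simp only [PySem.List.pyGetD_natCast]; simpa [List.getD] using hlast)]
        exact hrec.mpr hpre

-- ===== VERDICT (by name: the statement is the Claim_ definition above) =====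
theorem max_heap_spec : Claim_equal_max_heap := by
  intro L _
  unfold Spec_max_heap
  rw [Bool.eq_iff_iff, pv_A_iff L.length L rfl, pv_alt_iff]
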